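-- pv_equiv track=rewrite | github.com/0x0shephard/CV-Project | src/convert_colmap.py | compute_covisibility
-- ===== SOURCE A (Python) =====
-- from typing import Dict, List, Tuple
--
-- def compute_covisibility(tracks: Dict[int, List[int]], min_shared: int = 20, top_k: int = 5) -> Dict[int, List[int]]:
--     counts: Dict[Tuple[int, int], int] = {}
--     for cam_id, pts in tracks.items():
--         set_pts = set(pts)
--         for other_id, other_pts in tracks.items():
--             if other_id <= cam_id:
--                 continue
--             shared = len(set_pts.intersection(other_pts))
--             if shared >= min_shared:
--                 counts[(cam_id, other_id)] = shared
--     neighbors: Dict[int, List[int]] = {}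
--     for (a, b), cnt in counts.items():
--         neighbors.setdefault(a, []).append((b, cnt))
--         neighbors.setdefault(b, []).append((a, cnt))
--     pruned = {}
--     for cam_id, adj in neighbors.items():
--         adj_sorted = sorted(adj, key=lambda x: x[1], reverse=True)
--         pruned[cam_id] = [nid for nid, _ in adj_sorted[:top_k]]
--     return pruned
-- ===== SOURCE B (Python) =====
-- from typing import Dict, List, Tuple
--
-- def compute_covisibility(tracks: Dict[int, List[int]], min_shared: int = 20, top_k: int = 5) -> Dict[int, List[int]]:
--     # Invert to a point -> cameras index, count shared points per co-observing
--     # camera pair, then rebuild the qualifying pairs in the original pairwise order.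
--     point_cams: Dict[int, List[int]] = {}
--     for cam_id, pts in tracks.items():
--         for p in dict.fromkeys(pts):
--             point_cams.setdefault(p, []).append(cam_id)
--     pair_counts: Dict[Tuple[int, int], int] = {}
--     for cams in point_cams.values():
--         for i, a in enumerate(cams):
--             for b in cams[i + 1:]:
--                 key = (a, b) if a < b else (b, a)
--                 pair_counts[key] = pair_counts.get(key, 0) + 1
--     cam_ids = list(tracks)
--     neighbors: Dict[int, List[Tuple[int, int]]] = {}
--     for x in cam_ids:
--         for y in cam_ids:
--             if y <= x:
--                 continue
--             cnt = pair_counts.get((x, y), 0)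
--             if cnt >= min_shared:
--                 neighbors.setdefault(x, []).append((y, cnt))
--                 neighbors.setdefault(y, []).append((x, cnt))
--     pruned = {}
--     for cam_id, adj in neighbors.items():
--         adj_sorted = sorted(adj, key=lambda t: t[1], reverse=True)
--         pruned[cam_id] = [nid for nid, _ in adj_sorted[:top_k]]
--     return pruned
-- ===== Notes on version B (the rewrite author's own statement) =====
-- stated objective: faster
-- what changed: Replaces A's all-pairs set-intersection scan (every camera pair intersects full point lists) by an inverted point->cameras index whose co-observation pairs are counted once per shared point, then rebuilds the qualifying pairs in A's pairwise order via O(1) counter lookups.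
import Mathlib
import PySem

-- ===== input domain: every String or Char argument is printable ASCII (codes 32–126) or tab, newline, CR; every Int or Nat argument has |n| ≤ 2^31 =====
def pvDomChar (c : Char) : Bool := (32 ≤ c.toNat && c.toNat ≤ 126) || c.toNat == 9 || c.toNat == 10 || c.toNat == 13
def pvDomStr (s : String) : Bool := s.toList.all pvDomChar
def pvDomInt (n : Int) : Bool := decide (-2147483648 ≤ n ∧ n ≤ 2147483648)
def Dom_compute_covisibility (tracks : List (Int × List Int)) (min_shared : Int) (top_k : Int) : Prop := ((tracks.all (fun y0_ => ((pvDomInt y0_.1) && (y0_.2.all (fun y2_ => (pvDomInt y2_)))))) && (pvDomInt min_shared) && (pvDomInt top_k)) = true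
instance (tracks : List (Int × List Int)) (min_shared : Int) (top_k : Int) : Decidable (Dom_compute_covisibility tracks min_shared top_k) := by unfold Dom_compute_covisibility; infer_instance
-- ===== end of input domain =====

-- B inverts tracks to a point->cameras index and counts shared points only for
-- co-observing camera pairs, instead of A's per-pair set intersections (alternative algorithm).

-- ===== PORT A =====
-- tracks represents a Python dict: normalized by Dict.ofList (last value, first position),
-- exactly dict(pairs). setdefault(k, []).append(v) is Dict.modify k [] (· ++ [v]).
def compute_covisibility (tracks : List (Int × List Int)) (min_shared : Int) (top_k : Int) : List (Int × List Int) :=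
  let items := (PySem.Dict.ofList tracks).items
  let counts : PySem.Dict (Int × Int) Int :=
    items.foldl (fun counts xp =>
      let set_pts := PySem.Set.ofList xp.2
      items.foldl (fun counts yp =>
        if yp.1 ≤ xp.1 then counts
        else
          let shared : Int := ((PySem.Set.inter set_pts yp.2).length : Int)
          if min_shared ≤ shared then counts.insert (xp.1, yp.1) shared else counts)
        counts) PySem.Dict.empty
  let neighbors : PySem.Dict Int (List (Int × Int)) :=
    counts.items.foldl (fun nb kv =>
      let nb' := nb.modify kv.1.1 [] (· ++ [(kv.1.2, kv.2)])
      nb'.modify kv.1.2 [] (· ++ [(kv.1.1, kv.2)])) PySem.Dict.empty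
  let pruned : PySem.Dict Int (List Int) :=
    neighbors.items.foldl (fun pr kv =>
      let adj_sorted := PySem.List.sorted kv.2 (fun t => t.2) true
      pr.insert kv.1 ((PySem.List.slice adj_sorted none (some top_k)).map (·.1)))
      PySem.Dict.empty
  pruned.items

-- ===== PORT B =====
-- dict.fromkeys(pts) (ordered dedup) is PySem.List.dedup; pair_counts[key] = pair_counts.get(key, 0) + 1
-- is Dict.insert key (getD key 0 + 1).
def compute_covisibility_alt (tracks : List (Int × List Int)) (min_shared : Int) (top_k : Int) : List (Int × List Int) :=
  let items := (PySem.Dict.ofList tracks).items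
  let point_cams : PySem.Dict Int (List Int) :=
    items.foldl (fun pc cp =>
      (PySem.List.dedup cp.2).foldl (fun pc p => pc.modify p [] (· ++ [cp.1])) pc)
      PySem.Dict.empty
  let pair_counts : PySem.Dict (Int × Int) Int :=
    point_cams.values.foldl (fun d cams =>
      (PySem.List.enumerate cams).foldl (fun d ia =>
        (PySem.List.slice cams (some (ia.1 + 1)) none).foldl (fun d b =>
          let key := if ia.2 < b then (ia.2, b) else (b, ia.2)
          d.insert key (d.getD key 0 + 1)) d) d) PySem.Dict.empty
  let cam_ids := items.map (·.1)
  let neighbors : PySem.Dict Int (List (Int × Int)) :=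
    cam_ids.foldl (fun nb x =>
      cam_ids.foldl (fun nb y =>
        if y ≤ x then nb
        else
          let cnt := pair_counts.getD (x, y) 0
          if min_shared ≤ cnt then
            (nb.modify x [] (· ++ [(y, cnt)])).modify y [] (· ++ [(x, cnt)])
          else nb) nb) PySem.Dict.empty
  let pruned : PySem.Dict Int (List Int) :=
    neighbors.items.foldl (fun pr kv =>
      let adj_sorted := PySem.List.sorted kv.2 (fun t => t.2) true
      pr.insert kv.1 ((PySem.List.slice adj_sorted none (some top_k)).map (·.1)))
      PySem.Dict.empty
  pruned.items

-- ===== PRECONDITION & SPEC =====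
def Spec_compute_covisibility (tracks : List (Int × List Int)) (min_shared : Int) (top_k : Int) (out : List (Int × List Int)) : Prop := out = compute_covisibility_alt tracks min_shared top_k
instance (tracks : List (Int × List Int)) (min_shared : Int) (top_k : Int) (out : List (Int × List Int)) : Decidable (Spec_compute_covisibility tracks min_shared top_k out) := by unfold Spec_compute_covisibility; infer_instance

-- ===== CLAIM (what is proved, stated in full; the proofs are below) =====
def Claim_equal_compute_covisibility : Prop := ∀ (tracks : List (Int × List Int)) (min_shared : Int) (top_k : Int), Dom_compute_covisibility tracks min_shared top_k → Spec_compute_covisibility tracks min_shared top_k (compute_covisibility tracks min_shared top_k)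

-- ===== LEMMAS AND PROOFS =====

-- Proof-side abbreviations for sub-computations shared by the two ports.
def pvShared (px py : List Int) : Int := ((PySem.Set.inter (PySem.Set.ofList px) py).length : Int)

def pvNorm (a b : Int) : Int × Int := if a < b then (a, b) else (b, a)

def pvPairKeys : List Int → List (Int × Int)
  | [] => []
  | a :: t => t.map (pvNorm a) ++ pvPairKeys t

def pvCamsOf (its : List (Int × List Int)) (p : Int) : List Int :=
  (its.filter (fun cp => decide (p ∈ cp.2))).map (·.1)

def pvObs (its : List (Int × List Int)) : List (Int × Int) :=
  its.flatMap (fun cp => (PySem.List.dedup cp.2).map (fun p => (p, cp.1)))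

def pvPairSrc (its : List (Int × List Int)) (ms : Int) :
    List ((Int × List Int) × (Int × List Int)) :=
  its.flatMap (fun xp =>
    (its.filter (fun yp => decide (xp.1 < yp.1) && decide (ms ≤ pvShared xp.2 yp.2))).map
      (fun yp => (xp, yp)))

def pvStep (nb : PySem.Dict Int (List (Int × Int))) (kv : (Int × Int) × Int) :
    PySem.Dict Int (List (Int × Int)) :=
  (nb.modify kv.1.1 [] (· ++ [(kv.1.2, kv.2)])).modify kv.1.2 [] (· ++ [(kv.1.1, kv.2)])

def pvPointCams (its : List (Int × List Int)) : PySem.Dict Int (List Int) :=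
  its.foldl (fun pc cp =>
    (PySem.List.dedup cp.2).foldl (fun pc p => pc.modify p [] (· ++ [cp.1])) pc)
    PySem.Dict.empty

def pvPairCounts (its : List (Int × List Int)) : PySem.Dict (Int × Int) Int :=
  (pvPointCams its).values.foldl (fun d cams =>
    (PySem.List.enumerate cams).foldl (fun d ia =>
      (PySem.List.slice cams (some (ia.1 + 1)) none).foldl (fun d b =>
        d.insert (pvNorm ia.2 b) (d.getD (pvNorm ia.2 b) 0 + 1)) d) d) PySem.Dict.empty

-- filter for equality with a fixed element on a Nodup list
theorem pv_filter_beq_of_nodup (l : List Int) (hl : l.Nodup) (p : Int) :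
    l.filter (· == p) = if p ∈ l then [p] else [] := by
  induction l with
  | nil => simp
  | cons a t ih =>
    rcases List.nodup_cons.mp hl with ⟨ha, ht⟩
    by_cases hap : a = p
    · subst hap
      have h0 : t.filter (· == a) = [] := by
        rw [ih ht]; simp [ha]
      simp [h0]
    · rw [List.filter_cons]
      simp only [beq_iff_eq, hap, ih ht]
      simp [List.mem_cons, Ne.symm hap]

-- the point_cams loop, flattened over the observation list
theorem pv_pointCams_flat (its : List (Int × List Int)) :
    pvPointCams its
      = (pvObs its).foldl (fun pc q => pc.modify q.1 [] (· ++ [q.2])) PySem.Dict.empty := by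
  unfold pvPointCams pvObs
  rw [List.foldl_flatMap]
  refine PySem.List.foldl_congr_mem _ _ _ _ ?_
  intro pc cp _
  rw [List.foldl_map]

-- point_cams lookup: the cameras observing p, in camera order
theorem pv_pointCams_getD (its : List (Int × List Int)) (p : Int) :
    (pvPointCams its).getD p [] = pvCamsOf its p := by
  rw [pv_pointCams_flat, PySem.Dict.getD_foldl_modify_append, PySem.Dict.getD_empty]
  simp only [List.nil_append]
  induction its with
  | nil => simp [pvObs, pvCamsOf]
  | cons cp t ih =>
    have hhd : ((PySem.List.dedup cp.2).map (fun p' => (p', cp.1))).filter (fun q => q.1 == p)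
        = if p ∈ cp.2 then [(p, cp.1)] else [] := by
      rw [List.filter_map]
      have : (PySem.List.dedup cp.2).filter ((fun q => q.1 == p) ∘ (fun p' => (p', cp.1)))
          = (PySem.List.dedup cp.2).filter (· == p) := by
        exact List.filter_congr (fun b _ => rfl)
      rw [this, pv_filter_beq_of_nodup _ (PySem.List.nodup_dedup _) p]
      by_cases hp : p ∈ cp.2
      · rw [if_pos (by rwa [PySem.List.mem_dedup]), if_pos hp]; simp
      · rw [if_neg (by rw [PySem.List.mem_dedup]; exact hp), if_neg hp]; simp
    simp only [pvObs, List.flatMap_cons, List.filter_append, List.map_append]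
    rw [hhd]
    show _ ++ ((pvObs t).filter (fun q => q.1 == p)).map (·.2) = _
    rw [ih]
    unfold pvCamsOf
    rw [List.filter_cons]
    by_cases hp : p ∈ cp.2 <;> simp [hp]

theorem pv_pointCams_keys (its : List (Int × List Int)) :
    (pvPointCams its).keys = PySem.Set.ofList ((pvObs its).map (·.1)) := by
  rw [pv_pointCams_flat]
  rw [PySem.Dict.keys_foldl_modify_key (pvObs its) (·.1) [] (fun _ q => (· ++ [q.2]))
    PySem.Dict.empty]
  rw [PySem.Dict.keys_empty]
  rw [PySem.Set.ofList_eq_foldl]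
  rfl

theorem pv_pointCams_keys_nodup (its : List (Int × List Int)) :
    (pvPointCams its).keys.Nodup := by
  rw [pv_pointCams_keys]
  exact PySem.Set.nodup_ofList _

-- the enumerate/slice double loop is the structural suffix-pair loop
theorem pv_enumSlice_aux {δ : Type} (h : δ → (Int × Int) → δ) :
    ∀ (suf pre : List Int) (d : δ),
    (PySem.List.enumerate suf (pre.length : Int)).foldl (fun d ia =>
      (PySem.List.slice (pre ++ suf) (some (ia.1 + 1)) none).foldl
        (fun d b => h d (pvNorm ia.2 b)) d) d
    = (pvPairKeys suf).foldl h d := by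
  intro suf
  induction suf with
  | nil => intro pre d; simp [PySem.List.enumerate, pvPairKeys]
  | cons a t ih =>
    intro pre d
    have henum : PySem.List.enumerate (a :: t) (pre.length : Int)
        = ((pre.length : Int), a) :: PySem.List.enumerate t ((pre.length : Int) + 1) := by
      simp [PySem.List.enumerate]
    rw [henum, List.foldl_cons]
    have hslice : PySem.List.slice (pre ++ a :: t) (some ((pre.length : Int) + 1)) none = t := by
      rw [PySem.List.slice_from (pre ++ a :: t) (by positivity)]
      have : pre ++ a :: t = (pre ++ [a]) ++ t := by simp
      rw [this]
      have hlen : ((pre.length : Int) + 1).toNat = (pre ++ [a]).length := by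
        simp
      rw [hlen, List.drop_left]
    rw [hslice]
    have hcast : ((pre.length : Int) + 1) = (((pre ++ [a]).length : Nat) : Int) := by
      simp
    rw [hcast]
    have := ih (pre ++ [a]) (t.foldl (fun d b => h d (pvNorm a b)) d)
    have hsfx : pre ++ a :: t = (pre ++ [a]) ++ t := by simp
    rw [hsfx]
    rw [this]
    rw [pvPairKeys, List.foldl_append, List.foldl_map]

theorem pv_enumSlice_fold {δ : Type} (h : δ → (Int × Int) → δ) (cams : List Int) (d : δ) :
    (PySem.List.enumerate cams).foldl (fun d ia =>
      (PySem.List.slice cams (some (ia.1 + 1)) none).foldl (fun d b => h d (pvNorm ia.2 b)) d) d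
    = (pvPairKeys cams).foldl h d := by
  have := pv_enumSlice_aux h cams [] d
  simpa using this

-- the counter over all pair keys
theorem pv_pairCounts_getD (its : List (Int × List Int)) (k : Int × Int) :
    (pvPairCounts its).getD k 0 =
      (((pvPointCams its).values.flatMap pvPairKeys).count k : Int) := by
  unfold pvPairCounts
  have hloop : (pvPointCams its).values.foldl (fun d cams =>
      (PySem.List.enumerate cams).foldl (fun d ia =>
        (PySem.List.slice cams (some (ia.1 + 1)) none).foldl (fun d b =>
          d.insert (pvNorm ia.2 b) (d.getD (pvNorm ia.2 b) 0 + 1)) d) d)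
        (PySem.Dict.empty : PySem.Dict (Int × Int) Int)
      = ((pvPointCams its).values.flatMap pvPairKeys).foldl
          (fun d x => d.insert x (d.getD x 0 + 1)) PySem.Dict.empty := by
    rw [List.foldl_flatMap]
    refine PySem.List.foldl_congr_mem _ _ _ _ ?_
    intro d cams _
    exact pv_enumSlice_fold (fun d k => d.insert k (d.getD k 0 + 1)) cams d
  rw [hloop, PySem.Dict.getD_foldl_insert_add_one, PySem.Dict.getD_empty]
  ring

-- occurrences of a fixed normalized pair among the suffix pairs of a Nodup list
theorem pv_count_pairKeys (x y : Int) (hxy : x < y) (cams : List Int) (hnd : cams.Nodup) :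
    (pvPairKeys cams).count (x, y) = (if x ∈ cams ∧ y ∈ cams then 1 else 0) := by
  induction cams with
  | nil => simp [pvPairKeys]
  | cons a t ih =>
    rcases List.nodup_cons.mp hnd with ⟨ha, ht⟩
    rw [pvPairKeys, List.count_append, ih ht]
    have hmap : (t.map (pvNorm a)).count (x, y)
        = t.countP (fun b => pvNorm a b == (x, y)) := by
      rw [List.count, List.countP_map]
      exact List.countP_congr (fun b _ => Iff.rfl)
    by_cases hax : a = x
    · subst hax
      have h1 : t.countP (fun b => pvNorm a b == (a, y)) = t.count y := by
        rw [List.count]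
        refine List.countP_congr ?_
        intro b _
        unfold pvNorm
        constructor
        · intro hb
          split at hb <;> simp only [beq_iff_eq, Prod.mk.injEq] at hb ⊢ <;> try omega
        · intro hb
          simp only [beq_iff_eq] at hb; subst hb
          simp [hxy]
      rw [hmap, h1, ht.count]
      have hx0 : ¬ (a ∈ t ∧ y ∈ t) := fun h => ha h.1
      simp only [if_neg hx0, List.mem_cons]
      by_cases hyt : y ∈ t <;> (simp [hyt]; try omega)
    · by_cases hay : a = y
      · subst hay
        have h1 : t.countP (fun b => pvNorm a b == (x, a)) = t.count x := by
          rw [List.count]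
          refine List.countP_congr ?_
          intro b _
          unfold pvNorm
          constructor
          · intro hb
            split at hb <;> simp only [beq_iff_eq, Prod.mk.injEq] at hb ⊢ <;> try omega
          · intro hb
            simp only [beq_iff_eq] at hb; subst hb
            simp [Int.not_lt.mpr (Int.le_of_lt hxy)]
        rw [hmap, h1, ht.count]
        have hy0 : ¬ (x ∈ t ∧ a ∈ t) := fun h => ha h.2
        simp only [if_neg hy0, List.mem_cons]
        by_cases hxt : x ∈ t <;> (simp [hxt]; try omega)
      · have h1 : t.countP (fun b => pvNorm a b == (x, y)) = 0 := by
          rw [List.countP_eq_zero]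
          intro b _
          unfold pvNorm
          split <;> simp only [beq_iff_eq, Prod.mk.injEq, not_and] <;> intro h <;> omega
        rw [hmap, h1]
        have hx' : x ∈ a :: t ↔ x ∈ t := by
          rw [List.mem_cons]; exact or_iff_right (fun h => hax h.symm)
        have hy' : y ∈ a :: t ↔ y ∈ t := by
          rw [List.mem_cons]; exact or_iff_right (fun h => hay h.symm)
        simp [hx', hy']

theorem pv_camsOf_nodup (its : List (Int × List Int)) (hk : (its.map (·.1)).Nodup) (p : Int) :
    (pvCamsOf its p).Nodup := by
  unfold pvCamsOf
  exact hk.sublist (List.Sublist.map _ List.filter_sublist)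

theorem pv_mem_camsOf (its : List (Int × List Int)) (hk : (its.map (·.1)).Nodup)
    (xp : Int × List Int) (hx : xp ∈ its) (p : Int) :
    xp.1 ∈ pvCamsOf its p ↔ p ∈ xp.2 := by
  unfold pvCamsOf
  constructor
  · intro hm
    rcases List.mem_map.mp hm with ⟨cp, hcp, hfst⟩
    rcases List.mem_filter.mp hcp with ⟨hcpits, hpd⟩
    have hcx : cp = xp := List.inj_on_of_nodup_map hk hcpits hx hfst
    subst hcx
    simpa using hpd
  · intro hp
    exact List.mem_map.mpr ⟨xp, List.mem_filter.mpr ⟨hx, by simpa using hp⟩, rfl⟩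

-- countP agrees on any two Nodup lists that agree on the support of the predicate
theorem pv_countP_eq_of_support (q : Int → Bool) (u v : List Int) (hu : u.Nodup) (hv : v.Nodup)
    (h : ∀ a, q a = true → (a ∈ u ↔ a ∈ v)) : u.countP q = v.countP q := by
  rw [List.countP_eq_length_filter, List.countP_eq_length_filter]
  refine List.Perm.length_eq ?_
  rw [List.perm_ext_iff_of_nodup (hu.filter q) (hv.filter q)]
  intro a
  simp only [List.mem_filter]
  constructor
  · rintro ⟨hm, hq⟩; exact ⟨(h a hq).mp hm, hq⟩
  · rintro ⟨hm, hq⟩; exact ⟨(h a hq).mpr hm, hq⟩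

-- a 0/1 map-sum is a countP (Nat version)
theorem pv_sum_ite (q : Int → Bool) (l : List Int) :
    (l.map (fun a => if q a then 1 else 0)).sum = l.countP q := by
  induction l with
  | nil => simp
  | cons a t ih =>
    rw [List.map_cons, List.sum_cons, List.countP_cons, ih]
    by_cases hq : q a <;> (simp [hq]; try omega)

-- the heart: the inverted-index pair counter equals the per-pair intersection size
theorem pv_pairCounts_eq_shared (its : List (Int × List Int)) (hk : (its.map (·.1)).Nodup)
    (xp yp : Int × List Int) (hx : xp ∈ its) (hy : yp ∈ its) (hxy : xp.1 < yp.1) :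
    (pvPairCounts its).getD (xp.1, yp.1) 0 = pvShared xp.2 yp.2 := by
  have hkeysnd := pv_pointCams_keys_nodup its
  rw [pv_pairCounts_getD]
  have hvals : (pvPointCams its).values
      = (pvPointCams its).keys.map (fun p => pvCamsOf its p) := by
    rw [PySem.Dict.values_eq_map_keys (pvPointCams its) hkeysnd []]
    exact List.map_congr_left (fun p _ => pv_pointCams_getD its p)
  rw [hvals, List.count_flatMap, List.map_map]
  have hterm : ∀ p ∈ (pvPointCams its).keys,
      ((List.count (xp.1, yp.1) ∘ pvPairKeys) ∘ fun p => pvCamsOf its p) p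
        = (fun p => if (decide (p ∈ xp.2) && decide (p ∈ yp.2)) = true then 1 else 0) p := by
    intro p _
    show (pvPairKeys (pvCamsOf its p)).count (xp.1, yp.1) = _
    rw [pv_count_pairKeys xp.1 yp.1 hxy _ (pv_camsOf_nodup its hk p)]
    have e1 := pv_mem_camsOf its hk xp hx p
    have e2 := pv_mem_camsOf its hk yp hy p
    by_cases c1 : p ∈ xp.2 <;> by_cases c2 : p ∈ yp.2 <;>
      simp [c1, c2, e1, e2]
  rw [List.map_congr_left hterm, pv_sum_ite]
  have hsupp : (pvPointCams its).keys.countP (fun p => decide (p ∈ xp.2) && decide (p ∈ yp.2))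
      = (PySem.Set.ofList xp.2).countP (fun p => decide (p ∈ xp.2) && decide (p ∈ yp.2)) := by
    refine pv_countP_eq_of_support _ _ _ hkeysnd (PySem.Set.nodup_ofList _) ?_
    intro a hq
    simp only [Bool.and_eq_true, decide_eq_true_eq] at hq
    have h1 : a ∈ PySem.Set.ofList xp.2 := (PySem.Set.mem_ofList _ _).mpr hq.1
    have h2 : a ∈ (pvPointCams its).keys := by
      rw [pv_pointCams_keys, PySem.Set.mem_ofList]
      refine List.mem_map.mpr ⟨(a, xp.1), ?_, rfl⟩
      unfold pvObs
      refine List.mem_flatMap.mpr ⟨xp, hx, ?_⟩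
      exact List.mem_map.mpr ⟨a, (PySem.List.mem_dedup _ _).mpr hq.1, rfl⟩
    exact iff_of_true h2 h1
  rw [hsupp]
  have hcp : (PySem.Set.ofList xp.2).countP (fun p => decide (p ∈ xp.2) && decide (p ∈ yp.2))
      = (PySem.Set.ofList xp.2).countP (fun p => (yp.2).contains p) := by
    refine List.countP_congr ?_
    intro a ha
    have hax : a ∈ xp.2 := (PySem.Set.mem_ofList _ _).mp ha
    simp [hax, List.contains_eq_mem]
  rw [hcp]
  unfold pvShared
  rw [List.countP_eq_length_filter]
  rfl

-- the shared nested-loop shape of both ports, as a fold over the qualifying pairs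
theorem pv_nested {δ : Type} (its : List (Int × List Int)) (ms : Int)
    (F : δ → (Int × List Int) → (Int × List Int) → δ) (init : δ) :
    its.foldl (fun acc xp => its.foldl (fun acc yp =>
      if yp.1 ≤ xp.1 then acc
      else if ms ≤ pvShared xp.2 yp.2 then F acc xp yp else acc) acc) init
    = (pvPairSrc its ms).foldl (fun acc q => F acc q.1 q.2) init := by
  unfold pvPairSrc
  rw [List.foldl_flatMap]
  refine PySem.List.foldl_congr_mem _ _ _ _ ?_
  intro acc xp _
  rw [List.foldl_map,
    ← PySem.List.foldl_if_eq_foldl_filter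
      (fun yp => decide (xp.1 < yp.1) && decide (ms ≤ pvShared xp.2 yp.2))
      (fun acc yp => F acc xp yp)]
  refine PySem.List.foldl_congr_mem _ _ _ _ ?_
  intro acc yp _
  by_cases h1 : yp.1 ≤ xp.1
  · simp [h1, Int.not_lt.mpr h1]
  · by_cases h2 : ms ≤ pvShared xp.2 yp.2 <;>
      simp [h1, h2, Int.not_le.mp h1]

-- keys of the qualifying-pair list are distinct
theorem pv_pairSrc_keys_nodup (its : List (Int × List Int)) (ms : Int)
    (hk : (its.map (·.1)).Nodup) :
    ((pvPairSrc its ms).map (fun q => (q.1.1, q.2.1))).Nodup := by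
  unfold pvPairSrc
  rw [List.map_flatMap]
  rw [List.nodup_flatMap]
  constructor
  · intro xp _
    rw [List.map_map]
    have hre : ((fun q : (Int × List Int) × (Int × List Int) => (q.1.1, q.2.1)) ∘
          (fun yp => (xp, yp)))
        = (fun c : Int => (xp.1, c)) ∘ (fun yp : Int × List Int => yp.1) := rfl
    rw [hre, ← List.map_map]
    refine List.Nodup.map ?_ ?_
    · intro a b hab
      exact congrArg Prod.snd hab
    · exact hk.sublist (List.Sublist.map _ List.filter_sublist)
  · have hp : List.Pairwise (fun a b : Int × List Int => a.1 ≠ b.1) its := by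
      have h := hk
      rw [List.Nodup, List.pairwise_map] at h
      exact h
    refine hp.imp ?_
    intro a b hab z hza hzb
    simp only [List.map_map] at hza hzb
    rcases List.mem_map.mp hza with ⟨y1, _, h1⟩
    rcases List.mem_map.mp hzb with ⟨y2, _, h2⟩
    exact hab ((congrArg Prod.fst h1).trans (congrArg Prod.fst h2).symm)

-- A's counts dict, as an items list
theorem pv_countsA_items (its : List (Int × List Int)) (ms : Int)
    (hk : (its.map (·.1)).Nodup) :
    (its.foldl (fun counts xp =>
      its.foldl (fun counts yp =>
        if yp.1 ≤ xp.1 then counts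
        else
          if ms ≤ pvShared xp.2 yp.2 then
            counts.insert (xp.1, yp.1) (pvShared xp.2 yp.2)
          else counts) counts) (PySem.Dict.empty : PySem.Dict (Int × Int) Int)).items
    = (pvPairSrc its ms).map (fun q => ((q.1.1, q.2.1), pvShared q.1.2 q.2.2)) := by
  rw [pv_nested its ms
    (fun (c : PySem.Dict (Int × Int) Int) xp yp => c.insert (xp.1, yp.1) (pvShared xp.2 yp.2))
    PySem.Dict.empty]
  rw [PySem.Dict.items_foldl_insert_fresh (pvPairSrc its ms)
    (fun q => (q.1.1, q.2.1)) (fun q => pvShared q.1.2 q.2.2) PySem.Dict.empty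
    (fun a _ => PySem.Dict.contains_empty _)
    (pv_pairSrc_keys_nodup its ms hk)]
  simp [PySem.Dict.empty]

-- A's neighbors dict in canonical form
theorem pv_neighborsA (its : List (Int × List Int)) (ms : Int)
    (hk : (its.map (·.1)).Nodup) :
    ((its.foldl (fun counts xp =>
      its.foldl (fun counts yp =>
        if yp.1 ≤ xp.1 then counts
        else
          if ms ≤ pvShared xp.2 yp.2 then
            counts.insert (xp.1, yp.1) (pvShared xp.2 yp.2)
          else counts) counts) (PySem.Dict.empty : PySem.Dict (Int × Int) Int)).items.foldl
        (fun nb kv => pvStep nb kv) PySem.Dict.empty)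
    = (pvPairSrc its ms).foldl
        (fun nb q => pvStep nb ((q.1.1, q.2.1), pvShared q.1.2 q.2.2)) PySem.Dict.empty := by
  rw [pv_countsA_items its ms hk, List.foldl_map]

-- B's neighbors dict in the same canonical form
theorem pv_neighborsB (its : List (Int × List Int)) (ms : Int)
    (hk : (its.map (·.1)).Nodup) :
    ((its.map (·.1)).foldl (fun nb x =>
      (its.map (·.1)).foldl (fun nb y =>
        if y ≤ x then nb
        else
          if ms ≤ (pvPairCounts its).getD (x, y) 0 then
            pvStep nb ((x, y), (pvPairCounts its).getD (x, y) 0)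
          else nb) nb) PySem.Dict.empty)
    = (pvPairSrc its ms).foldl
        (fun nb q => pvStep nb ((q.1.1, q.2.1), pvShared q.1.2 q.2.2)) PySem.Dict.empty := by
  simp only [List.foldl_map]
  have hcongr : its.foldl (fun nb xp => its.foldl (fun nb yp =>
        if yp.1 ≤ xp.1 then nb
        else
          if ms ≤ (pvPairCounts its).getD (xp.1, yp.1) 0 then
            pvStep nb ((xp.1, yp.1), (pvPairCounts its).getD (xp.1, yp.1) 0)
          else nb) nb) (PySem.Dict.empty : PySem.Dict Int (List (Int × Int)))
      = its.foldl (fun nb xp => its.foldl (fun nb yp =>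
        if yp.1 ≤ xp.1 then nb
        else
          if ms ≤ pvShared xp.2 yp.2 then
            pvStep nb ((xp.1, yp.1), pvShared xp.2 yp.2)
          else nb) nb) PySem.Dict.empty := by
    refine PySem.List.foldl_congr_mem _ _ _ _ ?_
    intro nb xp hxp
    refine PySem.List.foldl_congr_mem _ _ _ _ ?_
    intro nb' yp hyp
    by_cases h1 : yp.1 ≤ xp.1
    · simp [h1]
    · simp only [if_neg h1]
      rw [pv_pairCounts_eq_shared its hk xp yp hxp hyp (Int.not_le.mp h1)]
  rw [hcongr]
  exact pv_nested its ms
    (fun (nb : PySem.Dict Int (List (Int × Int))) xp yp =>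
      pvStep nb ((xp.1, yp.1), pvShared xp.2 yp.2)) PySem.Dict.empty

-- the two ports, stated over an arbitrary items list with distinct keys
theorem pv_main (its : List (Int × List Int)) (ms tk : Int)
    (hk : (its.map (·.1)).Nodup) :
    ((((its.foldl (fun counts xp =>
        its.foldl (fun counts yp =>
          if yp.1 ≤ xp.1 then counts
          else
            if ms ≤ pvShared xp.2 yp.2 then
              counts.insert (xp.1, yp.1) (pvShared xp.2 yp.2)
            else counts) counts) (PySem.Dict.empty : PySem.Dict (Int × Int) Int)).items.foldl
          (fun nb kv => pvStep nb kv) PySem.Dict.empty).items.foldl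
        (fun pr kv =>
          pr.insert kv.1
            ((PySem.List.slice (PySem.List.sorted kv.2 (fun t => t.2) true) none (some tk)).map
              (·.1)))
        (PySem.Dict.empty : PySem.Dict Int (List Int))).items)
    = (((its.map (·.1)).foldl (fun nb x =>
        (its.map (·.1)).foldl (fun nb y =>
          if y ≤ x then nb
          else
            if ms ≤ (pvPairCounts its).getD (x, y) 0 then
              pvStep nb ((x, y), (pvPairCounts its).getD (x, y) 0)
            else nb) nb) PySem.Dict.empty).items.foldl
        (fun pr kv =>
          pr.insert kv.1
            ((PySem.List.slice (PySem.List.sorted kv.2 (fun t => t.2) true) none (some tk)).map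
              (·.1)))
        (PySem.Dict.empty : PySem.Dict Int (List Int))).items := by
  rw [pv_neighborsA its ms hk, pv_neighborsB its ms hk]

-- ===== VERDICT (by name: the statement is the Claim_ definition above) =====
theorem compute_covisibility_spec : Claim_equal_compute_covisibility := by
  intro tracks ms tk _
  show compute_covisibility tracks ms tk = compute_covisibility_alt tracks ms tk
  have hk : (((PySem.Dict.ofList tracks).items.map (·.1)).Nodup) := by
    simpa [PySem.Dict.keys] using PySem.Dict.nodup_keys_ofList tracks
  exact pv_main ((PySem.Dict.ofList tracks).items) ms tk hk
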